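-- pv_equiv track=rewrite | github.com/mbouaissi/VLIW470 | scheduler/utils.py | sort_instructions_by_unit
-- ===== SOURCE A (Python) =====
-- def sort_instructions_by_unit(schedule):
--     def get_unit_priority(opcode):
--         if opcode in ['mov', 'addi', 'add', 'sub']:
--             return 0  # ALU
--         elif opcode in ['mulu']:
--             return 1  # MULT
--         elif opcode in ['ld', 'st']:
--             return 2  # MEM
--         elif opcode in ['loop']:
--             return 3  # BRANCH
--         return 4
--
--     sorted_schedule = []
--     for cycle in schedule:
--         sorted_cycle = sorted(cycle, key=lambda instr: get_unit_priority(instr['opcode']))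
--         sorted_schedule.append(sorted_cycle)
--
--     return sorted_schedule
-- ===== SOURCE B (Python) =====
-- def sort_instructions_by_unit(schedule):
--     def get_unit_priority(opcode):
--         if opcode in ['mov', 'addi', 'add', 'sub']:
--             return 0  # ALU
--         elif opcode in ['mulu']:
--             return 1  # MULT
--         elif opcode in ['ld', 'st']:
--             return 2  # MEM
--         elif opcode in ['loop']:
--             return 3  # BRANCH
--         return 4
--
--     result = []
--     for cycle in schedule:
--         buckets = [[], [], [], [], []]
--         for instr in cycle:
--             buckets[get_unit_priority(instr['opcode'])].append(instr)
--         result.append(buckets[0] + buckets[1] + buckets[2] + buckets[3] + buckets[4])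
--     return result
-- ===== Notes on version B (the rewrite author's own statement) =====
-- stated objective: alternative
-- what changed: Replaces the per-cycle comparison sort keyed by functional-unit priority with a single-pass stable bucket distribution into five priority buckets concatenated in order.
import Mathlib
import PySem

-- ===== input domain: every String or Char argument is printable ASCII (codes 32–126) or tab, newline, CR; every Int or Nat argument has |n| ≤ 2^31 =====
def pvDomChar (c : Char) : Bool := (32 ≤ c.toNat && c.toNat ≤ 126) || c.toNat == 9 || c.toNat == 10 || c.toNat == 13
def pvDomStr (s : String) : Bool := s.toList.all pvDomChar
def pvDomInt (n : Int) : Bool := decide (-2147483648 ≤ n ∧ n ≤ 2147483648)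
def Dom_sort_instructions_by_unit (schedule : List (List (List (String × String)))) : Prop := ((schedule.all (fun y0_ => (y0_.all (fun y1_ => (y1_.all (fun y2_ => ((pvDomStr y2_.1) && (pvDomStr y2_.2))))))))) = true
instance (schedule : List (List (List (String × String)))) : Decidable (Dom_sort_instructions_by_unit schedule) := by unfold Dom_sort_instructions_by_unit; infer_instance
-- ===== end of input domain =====

-- B replaces the per-cycle comparison sort with a one-pass stable distribution into five
-- priority buckets concatenated in order (alternative decomposition, same results).

-- ===== PORT A =====
-- A's nested helper get_unit_priority
def pvGetUnitPriorityA (opcode : String) : Int :=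
  if opcode ∈ ["mov", "addi", "add", "sub"] then 0
  else if opcode ∈ ["mulu"] then 1
  else if opcode ∈ ["ld", "st"] then 2
  else if opcode ∈ ["loop"] then 3
  else 4

-- instr['opcode']: first-match dict lookup; made total with getD, Pre_ requires the key to be present
def pvOpcodeA (instr : List (String × String)) : String :=
  (PySem.Dict.mk instr).getD "opcode" ""

def sort_instructions_by_unit (schedule : List (List (List (String × String)))) : List (List (List (String × String))) :=
  schedule.foldl
    (fun sorted_schedule cycle =>
      sorted_schedule ++ [PySem.List.sorted cycle (fun instr => pvGetUnitPriorityA (pvOpcodeA instr))])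
    []

-- ===== PORT B =====
-- B's nested helper get_unit_priority (identical text in Source B)
def pvGetUnitPriorityB (opcode : String) : Int :=
  if opcode ∈ ["mov", "addi", "add", "sub"] then 0
  else if opcode ∈ ["mulu"] then 1
  else if opcode ∈ ["ld", "st"] then 2
  else if opcode ∈ ["loop"] then 3
  else 4

def pvOpcodeB (instr : List (String × String)) : String :=
  (PySem.Dict.mk instr).getD "opcode" ""

-- buckets[p].append(instr): one pass over the cycle, the five buckets as a 5-tuple
def pvDistribute (cycle : List (List (String × String))) :
    List (List (String × String)) × List (List (String × String)) × List (List (String × String)) ×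
    List (List (String × String)) × List (List (String × String)) :=
  cycle.foldl
    (fun b instr =>
      let p := pvGetUnitPriorityB (pvOpcodeB instr)
      if p = 0 then (b.1 ++ [instr], b.2.1, b.2.2.1, b.2.2.2.1, b.2.2.2.2)
      else if p = 1 then (b.1, b.2.1 ++ [instr], b.2.2.1, b.2.2.2.1, b.2.2.2.2)
      else if p = 2 then (b.1, b.2.1, b.2.2.1 ++ [instr], b.2.2.2.1, b.2.2.2.2)
      else if p = 3 then (b.1, b.2.1, b.2.2.1, b.2.2.2.1 ++ [instr], b.2.2.2.2)
      else (b.1, b.2.1, b.2.2.1, b.2.2.2.1, b.2.2.2.2 ++ [instr]))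
    ([], [], [], [], [])

def sort_instructions_by_unit_alt (schedule : List (List (List (String × String)))) : List (List (List (String × String))) :=
  schedule.map (fun cycle =>
    let b := pvDistribute cycle
    b.1 ++ b.2.1 ++ b.2.2.1 ++ b.2.2.2.1 ++ b.2.2.2.2)

-- ===== PRECONDITION & SPEC =====
-- Pre_ excludes instructions without an 'opcode' key, on which A raises KeyError.
def Pre_sort_instructions_by_unit (schedule : List (List (List (String × String)))) : Prop :=
  ∀ cycle ∈ schedule, ∀ instr ∈ cycle, (PySem.Dict.mk instr).contains "opcode" = true
instance (schedule : List (List (List (String × String)))) : Decidable (Pre_sort_instructions_by_unit schedule) := by unfold Pre_sort_instructions_by_unit; infer_instance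

def pvWitness_sort_instructions_by_unit : (List (List (List (String × String)))) :=
  [[[("opcode", "st")], [("opcode", "add")], [("opcode", "mulu")]], [[("opcode", "nop")]]]

def Spec_sort_instructions_by_unit (schedule : List (List (List (String × String)))) (out : List (List (List (String × String)))) : Prop := out = sort_instructions_by_unit_alt schedule
instance (schedule : List (List (List (String × String)))) (out : List (List (List (String × String)))) : Decidable (Spec_sort_instructions_by_unit schedule out) := by unfold Spec_sort_instructions_by_unit; infer_instance

-- ===== CLAIM (what is proved, stated in full; the proofs are below) =====
def Claim_equal_sort_instructions_by_unit : Prop := ∀ (schedule : List (List (List (String × String)))), Dom_sort_instructions_by_unit schedule → Pre_sort_instructions_by_unit schedule → Spec_sort_instructions_by_unit schedule (sort_instructions_by_unit schedule)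

-- ===== LEMMAS AND PROOFS =====

-- the sort key both ports use
def pvPrio (instr : List (String × String)) : Int := pvGetUnitPriorityA (pvOpcodeA instr)

theorem pvPrio_cases (instr : List (String × String)) :
    pvPrio instr = 0 ∨ pvPrio instr = 1 ∨ pvPrio instr = 2 ∨ pvPrio instr = 3 ∨ pvPrio instr = 4 := by
  unfold pvPrio pvGetUnitPriorityA
  split_ifs <;> simp

-- the k-th bucket is the filter of the cycle by priority k
def pvFilt (k : Int) (xs : List (List (String × String))) : List (List (String × String)) :=
  xs.filter (fun i => decide (pvPrio i = k))

theorem mem_filt_prio {k : Int} {i : List (String × String)} {xs : List (List (String × String))}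
    (h : i ∈ pvFilt k xs) : pvPrio i = k := by
  have := List.of_mem_filter h
  simpa using this

theorem insertBy_append_left {α : Type} (before : α → α → Bool) (x : α) (A B : List α)
    (h : ∀ a ∈ A, before x a = false) :
    PySem.List.insertBy before x (A ++ B) = A ++ PySem.List.insertBy before x B := by
  induction A with
  | nil => rfl
  | cons a A ih =>
    have ha : before x a = false := h a (by simp)
    simp [PySem.List.insertBy, ha, ih (fun a ha' => h a (by simp [ha']))]

theorem insertBy_all_before {α : Type} (before : α → α → Bool) (x : α) (B : List α)
    (h : ∀ b ∈ B, before x b = true) :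
    PySem.List.insertBy before x B = x :: B := by
  cases B with
  | nil => rfl
  | cons b B => simp [PySem.List.insertBy, h b (by simp)]

theorem filt_append_singleton (k : Int) (xs : List (List (String × String))) (x : List (String × String)) :
    pvFilt k (xs ++ [x]) = pvFilt k xs ++ if pvPrio x = k then [x] else [] := by
  simp only [pvFilt, List.filter_append]
  congr 1
  by_cases h : pvPrio x = k <;> simp [h]

-- sorted-by-priority is the concatenation of the five priority filters
theorem sorted_eq_filts (cycle : List (List (String × String))) :
    PySem.List.sorted cycle pvPrio false =
      pvFilt 0 cycle ++ pvFilt 1 cycle ++ pvFilt 2 cycle ++ pvFilt 3 cycle ++ pvFilt 4 cycle := by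
  induction cycle using List.reverseRecOn with
  | nil => rfl
  | append_singleton xs x ih =>
    rw [PySem.List.sorted_eq_foldl_insertBy, List.foldl_append, ← PySem.List.sorted_eq_foldl_insertBy, ih]
    simp only [List.foldl_cons, List.foldl_nil]
    have hnb : ∀ (j : Int), j ≤ pvPrio x → ∀ a ∈ pvFilt j xs,
        (decide (pvPrio x < pvPrio a)) = false := by
      intro j hj a ha
      have := mem_filt_prio ha
      simp [this]; omega
    have hb : ∀ (j : Int), pvPrio x < j → ∀ b ∈ pvFilt j xs,
        (decide (pvPrio x < pvPrio b)) = true := by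
      intro j hj b hb
      have := mem_filt_prio hb
      simp [this]; omega
    rw [filt_append_singleton, filt_append_singleton, filt_append_singleton,
        filt_append_singleton, filt_append_singleton]
    rcases pvPrio_cases x with hp | hp | hp | hp | hp
    · rw [show pvFilt 0 xs ++ pvFilt 1 xs ++ pvFilt 2 xs ++ pvFilt 3 xs ++ pvFilt 4 xs =
          pvFilt 0 xs ++ (pvFilt 1 xs ++ pvFilt 2 xs ++ pvFilt 3 xs ++ pvFilt 4 xs) by
            simp [List.append_assoc]]
      rw [insertBy_append_left _ x _ _ (hnb 0 (by omega)),
          insertBy_all_before _ x _ (by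
            intro b hbmem
            simp only [List.mem_append] at hbmem
            rcases hbmem with ((h1 | h1) | h1) | h1
            exacts [hb 1 (by omega) _ h1, hb 2 (by omega) _ h1, hb 3 (by omega) _ h1, hb 4 (by omega) _ h1])]
      simp [hp]
    · rw [show pvFilt 0 xs ++ pvFilt 1 xs ++ pvFilt 2 xs ++ pvFilt 3 xs ++ pvFilt 4 xs =
          (pvFilt 0 xs ++ pvFilt 1 xs) ++ (pvFilt 2 xs ++ pvFilt 3 xs ++ pvFilt 4 xs) by
            simp [List.append_assoc]]
      rw [insertBy_append_left _ x _ _ (by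
            intro a hamem
            simp only [List.mem_append] at hamem
            rcases hamem with h1 | h1
            exacts [hnb 0 (by omega) _ h1, hnb 1 (by omega) _ h1]),
          insertBy_all_before _ x _ (by
            intro b hbmem
            simp only [List.mem_append] at hbmem
            rcases hbmem with (h1 | h1) | h1
            exacts [hb 2 (by omega) _ h1, hb 3 (by omega) _ h1, hb 4 (by omega) _ h1])]
      simp [hp]
    · rw [show pvFilt 0 xs ++ pvFilt 1 xs ++ pvFilt 2 xs ++ pvFilt 3 xs ++ pvFilt 4 xs =
          (pvFilt 0 xs ++ pvFilt 1 xs ++ pvFilt 2 xs) ++ (pvFilt 3 xs ++ pvFilt 4 xs) by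
            simp [List.append_assoc]]
      rw [insertBy_append_left _ x _ _ (by
            intro a hamem
            simp only [List.mem_append] at hamem
            rcases hamem with (h1 | h1) | h1
            exacts [hnb 0 (by omega) _ h1, hnb 1 (by omega) _ h1, hnb 2 (by omega) _ h1]),
          insertBy_all_before _ x _ (by
            intro b hbmem
            simp only [List.mem_append] at hbmem
            rcases hbmem with h1 | h1
            exacts [hb 3 (by omega) _ h1, hb 4 (by omega) _ h1])]
      simp [hp]
    · rw [show pvFilt 0 xs ++ pvFilt 1 xs ++ pvFilt 2 xs ++ pvFilt 3 xs ++ pvFilt 4 xs =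
          (pvFilt 0 xs ++ pvFilt 1 xs ++ pvFilt 2 xs ++ pvFilt 3 xs) ++ pvFilt 4 xs by
            simp [List.append_assoc]]
      rw [insertBy_append_left _ x _ _ (by
            intro a hamem
            simp only [List.mem_append] at hamem
            rcases hamem with ((h1 | h1) | h1) | h1
            exacts [hnb 0 (by omega) _ h1, hnb 1 (by omega) _ h1, hnb 2 (by omega) _ h1,
                    hnb 3 (by omega) _ h1]),
          insertBy_all_before _ x _ (hb 4 (by omega))]
      simp [hp]
    · rw [PySem.List.insertBy_of_forall_not_before _ x _ (by
            intro a hamem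
            simp only [List.mem_append] at hamem
            rcases hamem with (((h1 | h1) | h1) | h1) | h1
            exacts [hnb 0 (by omega) _ h1, hnb 1 (by omega) _ h1, hnb 2 (by omega) _ h1,
                    hnb 3 (by omega) _ h1, hnb 4 (by omega) _ h1])]
      simp [hp]

-- the bucket distribution computes the five filters
theorem distribute_go (xs : List (List (String × String)))
    (b0 b1 b2 b3 b4 : List (List (String × String))) :
    xs.foldl
      (fun b instr =>
        let p := pvGetUnitPriorityB (pvOpcodeB instr)
        if p = 0 then (b.1 ++ [instr], b.2.1, b.2.2.1, b.2.2.2.1, b.2.2.2.2)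
        else if p = 1 then (b.1, b.2.1 ++ [instr], b.2.2.1, b.2.2.2.1, b.2.2.2.2)
        else if p = 2 then (b.1, b.2.1, b.2.2.1 ++ [instr], b.2.2.2.1, b.2.2.2.2)
        else if p = 3 then (b.1, b.2.1, b.2.2.1, b.2.2.2.1 ++ [instr], b.2.2.2.2)
        else (b.1, b.2.1, b.2.2.1, b.2.2.2.1, b.2.2.2.2 ++ [instr]))
      (b0, b1, b2, b3, b4) =
    (b0 ++ pvFilt 0 xs, b1 ++ pvFilt 1 xs, b2 ++ pvFilt 2 xs, b3 ++ pvFilt 3 xs, b4 ++ pvFilt 4 xs) := by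
  induction xs generalizing b0 b1 b2 b3 b4 with
  | nil => simp [pvFilt]
  | cons x xs ih =>
    have hkey : pvGetUnitPriorityB (pvOpcodeB x) = pvPrio x := rfl
    simp only [List.foldl_cons, hkey]
    rcases pvPrio_cases x with hp | hp | hp | hp | hp <;>
      simp [hp, ih, pvFilt, List.append_assoc]

theorem distribute_eq (cycle : List (List (String × String))) :
    pvDistribute cycle =
      (pvFilt 0 cycle, pvFilt 1 cycle, pvFilt 2 cycle, pvFilt 3 cycle, pvFilt 4 cycle) := by
  have := distribute_go cycle [] [] [] [] []
  simpa [pvDistribute] using this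

-- ===== VERDICT (by name: the statement is the Claim_ definition above) =====
theorem sort_instructions_by_unit_spec : Claim_equal_sort_instructions_by_unit := by
  intro schedule _ _
  unfold Spec_sort_instructions_by_unit
  rw [sort_instructions_by_unit, PySem.List.foldl_append_singleton_eq_map]
  unfold sort_instructions_by_unit_alt
  refine List.map_congr_left (fun cycle _ => ?_)
  show PySem.List.sorted cycle pvPrio false = _
  rw [sorted_eq_filts, distribute_eq]
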